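-- pv_equiv track=rewrite | github.com/irpedro/Exercicios-da-materia-de-Desafios-de-Programacao-2 | ATV5/vito.py | find_best_house
-- ===== SOURCE A (Python) =====
-- def find_best_house(houses, total):
--     temp = 0
--     best_house = 0
--     best_sum = 0
--
--     for i in range(1, houses[len(houses)-1]):
--         temp = total-i*houses[0]
--         if temp < 0:
--             temp *= -1
--         if temp<best_sum or i == 1:
--             best_sum = temp
--             best_house = i
--
--     return find_best_distance(houses, best_house)
--
-- def find_best_distance(houses, best_house):
--     temp = 0
--     distance = 0
--     for i in range(1, len(houses)):
--         temp = houses[i]-best_house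
--         if temp < 0:
--             temp *= -1
--         distance += temp
--     return distance
-- ===== SOURCE B (Python) =====
-- def find_best_house(houses, total):
--     limit = houses[-1] - 1
--     if limit < 1:
--         best = 0
--     elif houses[0] == 0:
--         best = 1
--     else:
--         h0 = houses[0]
--         d = total // h0
--         best = d if abs(total - d * h0) <= abs(total - (d + 1) * h0) else d + 1
--         best = min(max(best, 1), limit)
--     return sum(abs(h - best) for h in houses[1:])
-- ===== Notes on version B (the rewrite author's own statement) =====
-- stated objective: faster
-- what changed: A scans every integer position i in range(1, houses[-1]) to minimize |total - i*houses[0]|; B computes that minimizer in O(1) by rounding total//houses[0] (ties to the smaller position) and clamping it to [1, houses[-1]-1], then sums the distances in one pass.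
import Mathlib
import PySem

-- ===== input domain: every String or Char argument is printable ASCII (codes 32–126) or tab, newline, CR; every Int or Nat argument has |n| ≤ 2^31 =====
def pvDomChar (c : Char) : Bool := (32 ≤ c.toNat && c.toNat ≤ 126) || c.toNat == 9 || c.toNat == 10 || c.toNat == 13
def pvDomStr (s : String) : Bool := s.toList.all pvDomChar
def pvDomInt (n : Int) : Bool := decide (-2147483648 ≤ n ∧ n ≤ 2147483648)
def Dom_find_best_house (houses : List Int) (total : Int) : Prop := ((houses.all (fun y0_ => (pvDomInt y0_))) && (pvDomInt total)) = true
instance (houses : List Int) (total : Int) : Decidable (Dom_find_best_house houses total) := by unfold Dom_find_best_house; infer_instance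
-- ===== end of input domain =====

-- B replaces A's O(houses[-1]) brute-force scan over candidate positions with a closed-form
-- rounding of total/houses[0] clamped to [1, houses[-1]-1] (ties to the smaller position).

-- ===== PORT A =====
def find_best_distance (houses : List Int) (best_house : Int) : Int :=
  (PySem.List.pyRange 1 ((houses.length : Int)) 1).foldl
    (fun distance i =>
      let temp := PySem.List.pyGetD houses i 0 - best_house
      let temp := if temp < 0 then temp * (-1) else temp
      distance + temp) 0

def find_best_house (houses : List Int) (total : Int) : Int :=
  let st :=
    (PySem.List.pyRange 1 (PySem.List.pyGetD houses ((houses.length : Int) - 1) 0) 1).foldl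
      (fun (s : Int × Int) i =>
        let temp := total - i * PySem.List.pyGetD houses 0 0
        let temp := if temp < 0 then temp * (-1) else temp
        if temp < s.2 ∨ i = 1 then (i, temp) else s) (0, 0)
  find_best_distance houses st.1

-- ===== PORT B =====
def find_best_house_alt (houses : List Int) (total : Int) : Int :=
  let limit := (PySem.List.pyGet? houses (-1)).getD 0 - 1
  let best : Int :=
    if limit < 1 then 0
    else if PySem.List.pyGetD houses 0 0 = 0 then 1
    else
      let h0 := PySem.List.pyGetD houses 0 0
      let d := PySem.Int.floordiv total h0
      let b := if |total - d * h0| ≤ |total - (d + 1) * h0| then d else d + 1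
      min (max b 1) limit
  ((PySem.List.slice houses (some 1) none).map (fun h => |h - best|)).sum

-- ===== PRECONDITION & SPEC =====
-- Pre_ excludes only the empty list, on which the Python A raises IndexError (houses[-1]).
def Pre_find_best_house (houses : List Int) (total : Int) : Prop := houses ≠ []
instance (houses : List Int) (total : Int) : Decidable (Pre_find_best_house houses total) := by unfold Pre_find_best_house; infer_instance
def pvWitness_find_best_house : List Int × Int := ([3, 1, 2, 5], 7)

def Spec_find_best_house (houses : List Int) (total : Int) (out : Int) : Prop := out = find_best_house_alt houses total
instance (houses : List Int) (total : Int) (out : Int) : Decidable (Spec_find_best_house houses total out) := by unfold Spec_find_best_house; infer_instance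

-- ===== CLAIM (what is proved, stated in full; the proofs are below) =====
def Claim_equal_find_best_house : Prop := ∀ (houses : List Int) (total : Int), Dom_find_best_house houses total → Pre_find_best_house houses total → Spec_find_best_house houses total (find_best_house houses total)

-- ===== LEMMAS AND PROOFS =====

-- Python's manual abs (`if temp < 0: temp *= -1`) is |·|.
lemma pyAbs (x : Int) : (if x < 0 then x * (-1) else x) = |x| := by
  split_ifs with h
  · rw [abs_of_neg h]; ring
  · rw [abs_of_nonneg (by omega)]

-- B's rounded candidate position (the let-chain in the port, as a named helper).
def candB (h0 total : Int) : Int :=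
  let d := PySem.Int.floordiv total h0
  if |total - d * h0| ≤ |total - (d + 1) * h0| then d else d + 1

-- A's loop body, as a named helper (definitionally the port's lambda once houses[0] is h0).
def stepA (h0 total : Int) (s : Int × Int) (i : Int) : Int × Int :=
  let temp := total - i * h0
  let temp := if temp < 0 then temp * (-1) else temp
  if temp < s.2 ∨ i = 1 then (i, temp) else s

-- The least argmin of |total - i*h0| over 1..k (= B's clamp; 1 when h0 = 0).
def cSel (h0 total k : Int) : Int := if h0 = 0 then 1 else min (max (candB h0 total) 1) k

-- residual E with the divisor's sign normalised away
def resE (h0 total : Int) : Int :=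
  if 0 < h0 then total - candB h0 total * h0 else candB h0 total * h0 - total

lemma core_mono (a e u v : Int) (ha : 0 < a) (h1 : -a < 2*e) (h2 : 2*e ≤ a)
    (hu : 0 ≤ u) (huv : u ≤ v) : |e - u*a| ≤ |e - v*a| := by
  rcases eq_or_lt_of_le huv with rfl | hlt
  · exact le_refl _
  · have hv1 : 1 ≤ v := by omega
    have hva : a ≤ v * a := by nlinarith
    have hua : u * a ≤ v * a := by nlinarith
    have habs : |e - v*a| = v*a - e := by
      rw [abs_of_nonpos (by linarith)]; ring
    rw [habs]
    refine abs_le.2 ⟨by linarith, by nlinarith⟩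

lemma core_strict (a e u v : Int) (ha : 0 < a) (h1 : -a < 2*e)
    (hu : 0 ≤ u) (huv : u < v) : |e + u*a| < |e + v*a| := by
  have hv1 : 1 ≤ v := by omega
  have hva : a ≤ v * a := by nlinarith
  have hua : u * a < v * a := by nlinarith
  have hpos : 0 < e + v * a := by nlinarith
  rw [abs_of_pos hpos]
  exact abs_lt.2 ⟨by nlinarith, by linarith⟩

lemma candB_neg (h0 total : Int) : candB h0 total = candB (-h0) (-total) := by
  unfold candB
  rw [PySem.Int.floordiv_neg_neg]
  have e1 : |-total - PySem.Int.floordiv total h0 * -h0| = |total - PySem.Int.floordiv total h0 * h0| := by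
    rw [show (-total - PySem.Int.floordiv total h0 * -h0) = -(total - PySem.Int.floordiv total h0 * h0) by ring, abs_neg]
  have e2 : |-total - (PySem.Int.floordiv total h0 + 1) * -h0| = |total - (PySem.Int.floordiv total h0 + 1) * h0| := by
    rw [show (-total - (PySem.Int.floordiv total h0 + 1) * -h0) = -(total - (PySem.Int.floordiv total h0 + 1) * h0) by ring, abs_neg]
  simp only [e1, e2]

lemma cand_bracket_pos (h0 total : Int) (h : 0 < h0) :
    -h0 < 2*(total - candB h0 total * h0) ∧ 2*(total - candB h0 total * h0) ≤ h0 := by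
  unfold candB
  have hd : PySem.Int.floordiv total h0 = total / h0 := PySem.Int.floordiv_eq_ediv_of_pos h
  simp only [hd]
  have hmul : (total / h0) * h0 = h0 * (total / h0) := mul_comm _ _
  have hkey : total - (total / h0) * h0 = total % h0 := by
    have := Int.mul_ediv_add_emod total h0; linarith
  have hkey2 : total - (total / h0 + 1) * h0 = total % h0 - h0 := by
    have : (total / h0 + 1) * h0 = (total / h0) * h0 + h0 := by ring
    linarith
  have hr0 : 0 ≤ total % h0 := Int.emod_nonneg total (ne_of_gt h)
  have hrlt : total % h0 < h0 := Int.emod_lt_of_pos total h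
  split_ifs with hc
  · rw [hkey, hkey2, abs_of_nonneg hr0, abs_of_nonpos (by omega)] at hc
    rw [hkey]; omega
  · rw [hkey, hkey2, abs_of_nonneg hr0, abs_of_nonpos (by omega)] at hc
    rw [hkey2]; omega

lemma resE_bracket (h0 total : Int) (hne : h0 ≠ 0) :
    -|h0| < 2 * resE h0 total ∧ 2 * resE h0 total ≤ |h0| := by
  unfold resE
  rcases lt_trichotomy 0 h0 with hpos | hz | hneg
  · rw [if_pos hpos, abs_of_pos hpos]
    exact cand_bracket_pos h0 total hpos
  · exact absurd hz.symm hne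
  · rw [if_neg (by omega), abs_of_neg hneg]
    have hb := cand_bracket_pos (-h0) (-total) (by omega)
    rw [← candB_neg] at hb
    constructor <;> nlinarith [hb.1, hb.2]

lemma f_eq (h0 total i : Int) (hne : h0 ≠ 0) :
    |total - i*h0| = abs (resE h0 total - (i - candB h0 total) * |h0|) := by
  unfold resE
  rcases lt_trichotomy 0 h0 with hpos | hz | hneg
  · rw [if_pos hpos, abs_of_pos hpos,
      show (total - candB h0 total * h0 - (i - candB h0 total) * h0) = total - i*h0 by ring]
  · exact absurd hz.symm hne
  · rw [if_neg (by omega), abs_of_neg hneg,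
      show (candB h0 total * h0 - total - (i - candB h0 total) * -h0) = -(total - i*h0) by ring, abs_neg]

lemma f_mono (h0 total i j : Int) (hne : h0 ≠ 0)
    (hci : candB h0 total ≤ i) (hij : i ≤ j) : |total - i*h0| ≤ |total - j*h0| := by
  rw [f_eq h0 total i hne, f_eq h0 total j hne]
  obtain ⟨h1, h2⟩ := resE_bracket h0 total hne
  exact core_mono |h0| (resE h0 total) (i - candB h0 total) (j - candB h0 total)
    (abs_pos.2 hne) h1 h2 (by omega) (by omega)

lemma f_strict (h0 total i j : Int) (hne : h0 ≠ 0)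
    (hij : i < j) (hj : j ≤ candB h0 total) : |total - j*h0| < |total - i*h0| := by
  rw [f_eq h0 total i hne, f_eq h0 total j hne]
  obtain ⟨h1, _⟩ := resE_bracket h0 total hne
  have := core_strict |h0| (resE h0 total) (candB h0 total - j) (candB h0 total - i)
    (abs_pos.2 hne) h1 (by omega) (by omega)
  rwa [show resE h0 total + (candB h0 total - j) * |h0|
        = resE h0 total - (j - candB h0 total) * |h0| by ring,
      show resE h0 total + (candB h0 total - i) * |h0|
        = resE h0 total - (i - candB h0 total) * |h0| by ring] at this

lemma scan_lemma (h0 total : Int) (n : Nat) :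
    (PySem.List.pyRange 1 ((n:Int)+2) 1).foldl (stepA h0 total) (0,0)
    = (cSel h0 total ((n:Int)+1), |total - cSel h0 total ((n:Int)+1) * h0|) := by
  induction n with
  | zero =>
    have hr : PySem.List.pyRange 1 (((0:Nat):Int)+2) 1 = [1] := by
      have := PySem.List.pyRange_one_singleton (1:Int)
      norm_num at this ⊢
      exact this
    have hc1 : cSel h0 total (((0:Nat):Int)+1) = 1 := by
      unfold cSel; split_ifs with h
      · rfl
      · norm_num
    rw [hr, hc1]
    simp only [List.foldl_cons, List.foldl_nil, stepA, pyAbs]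
    simp
  | succ n ih =>
    have hsplit : PySem.List.pyRange 1 (((n+1:Nat):Int)+2) 1
        = PySem.List.pyRange 1 ((n:Int)+2) 1 ++ [(n:Int)+2] := by
      rw [show (((n+1:Nat):Int)+2) = ((n:Int)+2)+1 by push_cast; ring]
      exact PySem.List.pyRange_one_succ_right (by omega)
    rw [hsplit, List.foldl_append, ih]
    simp only [List.foldl_cons, List.foldl_nil]
    rw [show (((n+1:Nat):Int)+1) = ((n:Int)+1)+1 by push_cast; ring,
        show ((n:Int)+2) = ((n:Int)+1)+1 by ring]
    set k : Int := (n:Int)+1 with hkdef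
    have hk1 : 1 ≤ k := by have : (0:Int) ≤ (n:Int) := Int.natCast_nonneg n; omega
    have hne1 : k + 1 ≠ 1 := by omega
    by_cases h0z : h0 = 0
    · subst h0z
      have hcs : ∀ m : Int, cSel 0 total m = 1 := fun m => by unfold cSel; simp
      simp only [stepA, pyAbs, hcs]
      rw [if_neg (by simp only [mul_zero, sub_zero, not_or]; exact ⟨lt_irrefl _, hne1⟩)]
    · by_cases hup : k + 1 ≤ candB h0 total
      · have hck : cSel h0 total k = k := by
          unfold cSel; rw [if_neg h0z, max_eq_left (by omega), min_eq_right (by omega)]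
        have hck1 : cSel h0 total (k+1) = k+1 := by
          unfold cSel; rw [if_neg h0z, max_eq_left (by omega), min_eq_right (by omega)]
        have hlt := f_strict h0 total k (k+1) h0z (by omega) hup
        rw [hck, hck1]
        simp only [stepA, pyAbs]
        rw [if_pos (Or.inl hlt)]
      · rw [not_le] at hup
        have hmle : max (candB h0 total) 1 ≤ k := max_le (by omega) hk1
        have hck : cSel h0 total k = max (candB h0 total) 1 := by
          unfold cSel; rw [if_neg h0z, min_eq_left hmle]
        have hck1 : cSel h0 total (k+1) = max (candB h0 total) 1 := by
          unfold cSel; rw [if_neg h0z, min_eq_left (by omega)]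
        have hge := f_mono h0 total (max (candB h0 total) 1) (k+1) h0z (le_max_left _ _) (by omega)
        rw [hck, hck1]
        simp only [stepA, pyAbs]
        rw [if_neg (by simp only [not_or]; exact ⟨not_lt.2 hge, hne1⟩)]

lemma dist_eq (houses : List Int) (best : Int) :
    find_best_distance houses best
    = ((PySem.List.slice houses (some 1) none).map (fun x => |x - best|)).sum := by
  unfold find_best_distance
  show (PySem.List.pyRange 1 ((houses.length : Int)) 1).foldl
      (fun distance i => distance +
        (if PySem.List.pyGetD houses i 0 - best < 0
          then (PySem.List.pyGetD houses i 0 - best) * (-1)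
          else PySem.List.pyGetD houses i 0 - best)) 0 = _
  rw [PySem.List.foldl_pyRange_pyGetD' houses 0
      (fun acc x => acc + (if x - best < 0 then (x - best) * (-1) else x - best)) 0
      (by norm_num : (0:Int) ≤ 1)]
  rw [PySem.List.slice_from_one]
  simp only [pyAbs, Int.toNat_one, List.drop_one]
  rw [PySem.List.foldl_add _ (fun x => |x - best|) 0, zero_add]

-- ===== VERDICT (by name: the statement is the Claim_ definition above) =====
lemma main_eq (h : Int) (t : List Int) (total : Int) :
    find_best_house (h :: t) total = find_best_house_alt (h :: t) total := by
  have hne : (h :: t) ≠ ([] : List Int) := by simp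
  have hlast : (h :: t).getLast? = some ((h :: t).getLast hne) := List.getLast?_eq_some_getLast hne
  unfold find_best_house find_best_house_alt
  simp only [PySem.List.pyGet?_neg_one, hlast, Option.getD_some]
  set L := (h :: t).getLast hne with hLdef
  have hidx : PySem.List.pyGetD (h :: t) (((h :: t).length : Int) - 1) 0 = L := by
    rw [show (((h :: t).length : Int) - 1) = ((t.length : Nat) : Int) by
          push_cast [List.length_cons]; ring,
        PySem.List.pyGetD_natCast, List.getD_eq_getElem?_getD]
    have h1 : (h :: t)[t.length]? = (h :: t).getLast? := by
      rw [List.getLast?_eq_getElem?]; simp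
    rw [h1, hlast, Option.getD_some]
  have hh0 : PySem.List.pyGetD (h :: t) 0 0 = h := by
    rw [PySem.List.pyGetD_ofNat']; rfl
  rw [hidx, hh0]
  by_cases hb : L ≤ 1
  · rw [PySem.List.pyRange_one_eq_nil hb, if_pos (by omega)]
    simp only [List.foldl_nil]
    exact dist_eq (h :: t) 0
  · have hb2 : 2 ≤ L := by omega
    have hLn : L = (((L - 2).toNat : Nat) : Int) + 2 := by
      have := Int.toNat_of_nonneg (show (0:Int) ≤ L - 2 by omega); omega
    rw [if_neg (by omega)]
    have hfold := scan_lemma h total (L - 2).toNat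
    rw [← hLn] at hfold
    have hstep : (fun (s : Int × Int) i =>
        let temp := total - i * h
        let temp := if temp < 0 then temp * (-1) else temp
        if temp < s.2 ∨ i = 1 then (i, temp) else s) = stepA h total := rfl
    rw [hstep, hfold]
    rw [dist_eq]
    have hsel : cSel h total ((((L - 2).toNat : Nat) : Int) + 1)
        = (if h = 0 then (1:Int) else
            min (max (if |total - PySem.Int.floordiv total h * h|
                        ≤ |total - (PySem.Int.floordiv total h + 1) * h|
                      then PySem.Int.floordiv total h
                      else PySem.Int.floordiv total h + 1) 1) (L - 1)) := by
      unfold cSel candB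
      rw [show ((((L - 2).toNat : Nat) : Int) + 1) = L - 1 by omega]
    simp only [hsel]

theorem find_best_house_spec : Claim_equal_find_best_house := by
  unfold Claim_equal_find_best_house
  intro houses total hDom hPre
  unfold Spec_find_best_house
  cases houses with
  | nil => exact absurd rfl hPre
  | cons h t => exact main_eq h t total
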